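-- pv_equiv track=rewrite | github.com/venkyjayasurya/HackerRankSolvedProblems | 18_07_2021/InTheLine.py | FreqCheck
-- ===== SOURCE A (Python) =====
-- def FreqCheck(arr):
--     elements_count = {}
--     a=[]
--     for element in arr:
--         if element in elements_count:
--             elements_count[element] += 1
--         else:
--             elements_count[element] = 1
--     for key, value in elements_count.items():
--         if(value>=4):
--             return key
-- ===== SOURCE B (Python) =====
-- def FreqCheck(arr):
--     for x in arr:
--         if arr.count(x) >= 4:
--             return x
-- ===== Notes on version B (the rewrite author's own statement) =====
-- stated objective: simpler
-- what changed: Replaces A's frequency dictionary plus second pass over its items by a single in-order scan that returns the first element x with arr.count(x) >= 4.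
import Mathlib
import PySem

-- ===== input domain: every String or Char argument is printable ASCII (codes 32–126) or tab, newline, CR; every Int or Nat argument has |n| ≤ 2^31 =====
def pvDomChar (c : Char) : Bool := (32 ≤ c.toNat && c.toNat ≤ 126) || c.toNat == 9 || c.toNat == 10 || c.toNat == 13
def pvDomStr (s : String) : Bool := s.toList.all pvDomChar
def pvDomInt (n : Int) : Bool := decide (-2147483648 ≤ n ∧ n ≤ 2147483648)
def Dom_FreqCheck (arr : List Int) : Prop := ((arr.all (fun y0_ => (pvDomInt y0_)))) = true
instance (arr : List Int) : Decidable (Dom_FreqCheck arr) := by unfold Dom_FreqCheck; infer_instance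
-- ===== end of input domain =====

-- B replaces A's count-dictionary and item scan by one in-order scan using arr.count(x); simpler, same return value.

-- ===== PORT A =====
-- second loop of A: first key whose count is >= 4
def FreqCheckScan : List (Int × Int) → Option Int
  | [] => none
  | (k, v) :: rest => if v ≥ 4 then some k else FreqCheckScan rest

def FreqCheck (arr : List Int) : Option Int :=
  let counts := arr.foldl
    (fun d x => if d.contains x then d.insert x (d.getD x 0 + 1) else d.insert x 1)
    PySem.Dict.empty
  FreqCheckScan counts.items

-- ===== PORT B =====
def FreqCheckGo (arr : List Int) : List Int → Option Int
  | [] => none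
  | x :: rest => if arr.count x ≥ 4 then some x else FreqCheckGo arr rest

def FreqCheck_alt (arr : List Int) : Option Int := FreqCheckGo arr arr

-- ===== PRECONDITION & SPEC =====
def Spec_FreqCheck (arr : List Int) (out : Option Int) : Prop := out = FreqCheck_alt arr
instance (arr : List Int) (out : Option Int) : Decidable (Spec_FreqCheck arr out) := by unfold Spec_FreqCheck; infer_instance

-- ===== CLAIM (what is proved, stated in full; the proofs are below) =====
def Claim_equal_FreqCheck : Prop := ∀ (arr : List Int), Dom_FreqCheck arr → Spec_FreqCheck arr (FreqCheck arr)

-- ===== LEMMAS AND PROOFS =====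

-- A's counting loop builds exactly Counter(arr)
theorem freq_fold_eq_counter (arr : List Int) :
    arr.foldl (fun d x => if d.contains x then d.insert x (d.getD x 0 + 1) else d.insert x 1)
      PySem.Dict.empty = PySem.Dict.counter arr := by
  rw [← PySem.Dict.foldl_insert_getD_add_one_eq_counter]
  congr 1
  funext d x
  by_cases h : d.contains x
  · simp [h]
  · simp only [Bool.not_eq_true] at h
    simp [h, PySem.Dict.getD_of_not_contains d 0 h]

-- scanning the items of a counter-shaped list is scanning the keys
theorem scan_map (arr : List Int) (l : List Int) :
    FreqCheckScan (l.map (fun k => (k, (arr.count k : Int)))) = FreqCheckGo arr l := by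
  induction l with
  | nil => rfl
  | cons x t ih =>
      simp only [List.map_cons, FreqCheckScan, FreqCheckGo]
      have hc : ((arr.count x : Int) ≥ 4) ↔ (arr.count x ≥ 4) := by omega
      by_cases h : arr.count x ≥ 4
      · simp [hc.mpr h, h]
      · simp [h, ih]

theorem go_eq_find? (arr : List Int) (l : List Int) :
    FreqCheckGo arr l = l.find? (fun x => decide (arr.count x ≥ 4)) := by
  induction l with
  | nil => rfl
  | cons x t ih =>
      simp only [FreqCheckGo, List.find?]
      by_cases h : arr.count x ≥ 4 <;> simp [h, ih]

-- dropping elements that fail the predicate does not change the first hit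
theorem find?_filter_ne {p : Int → Bool} {x : Int} (hx : p x = false) (l : List Int) :
    (l.filter (fun y => !(y == x))).find? p = l.find? p := by
  induction l with
  | nil => rfl
  | cons a t ih =>
      by_cases ha : a = x
      · subst ha; simpa [hx] using ih
      · have hb : (a == x) = false := by simpa using ha
        by_cases hp : p a = true
        · simp [hb, List.find?, hp]
        · simp only [Bool.not_eq_true] at hp
          simp [hb, List.find?, hp, ih]

-- first match in the ordered set of first occurrences = first match in the list
theorem find?_ofList (p : Int → Bool) (xs : List Int) :
    (PySem.Set.ofList xs).find? p = xs.find? p := by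
  induction xs with
  | nil => rfl
  | cons x t ih =>
      rw [PySem.Set.ofList_cons]
      by_cases hp : p x = true
      · simp [List.find?, hp]
      · simp only [Bool.not_eq_true] at hp
        simp only [List.find?, hp, PySem.Set.discard]
        rw [find?_filter_ne hp, ih]

-- ===== VERDICT (by name: the statement is the Claim_ definition above) =====
theorem FreqCheck_spec : Claim_equal_FreqCheck := by
  intro arr _
  unfold Spec_FreqCheck FreqCheck FreqCheck_alt
  simp only [freq_fold_eq_counter, PySem.Dict.items_counter, scan_map, go_eq_find?]
  exact find?_ofList _ _
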